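-- pv_equiv track=rewrite | github.com/jianyilai/INF1002PythonP88 | src/rules/distance_domain_check.py | is_homoglyph_domain
-- ===== SOURCE A (Python) =====
-- HOMOGLYPHS = {
--     'I': 'l',  # Uppercase i for lowercase L
--     'i': 'l',  # Lowercase i for lowercase L
--     'l': 'I',  # Lowercase L for uppercase i
-- }
--
-- def is_homoglyph_domain(input_domain, known_domains):
--     # For each known domain, check if changing any single homoglyph in input_domain matches the legit domain
--     for legit_domain in known_domains:
--         if len(input_domain) != len(legit_domain):
--             continue
--         for i, (c1, c2) in enumerate(zip(input_domain, legit_domain)):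
--             if c1 != c2 and c1 in HOMOGLYPHS and HOMOGLYPHS[c1] == c2:
--                 # Try replacing just this character and see if it matches
--                 candidate = input_domain[:i] + HOMOGLYPHS[c1] + input_domain[i+1:]
--                 if candidate == legit_domain:
--                     return True, legit_domain
--     return False, None
-- ===== SOURCE B (Python) =====
-- HOMOGLYPHS = {
--     'I': 'l',  # Uppercase i for lowercase L
--     'i': 'l',  # Lowercase i for lowercase L
--     'l': 'I',  # Lowercase L for uppercase i
-- }
--
-- def is_homoglyph_domain(input_domain, known_domains):
--     # One pass per domain: collect the mismatching character pairs; it is a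
--     # single-homoglyph match iff there is exactly one mismatch and it is a
--     # homoglyph substitution.  No candidate strings are ever built.
--     n = len(input_domain)
--     for legit_domain in known_domains:
--         if len(legit_domain) != n:
--             continue
--         diffs = [(a, b) for a, b in zip(input_domain, legit_domain) if a != b]
--         if len(diffs) == 1 and HOMOGLYPHS.get(diffs[0][0]) == diffs[0][1]:
--             return True, legit_domain
--     return False, None
-- ===== Notes on version B (the rewrite author's own statement) =====
-- stated objective: alternative
-- what changed: B collects the mismatching character pairs of each equal-length domain in one zip pass and accepts iff there is exactly one mismatch and it is a homoglyph substitution, instead of A's per-position rebuild of a candidate string by slicing and full-string comparison.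
import Mathlib
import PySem

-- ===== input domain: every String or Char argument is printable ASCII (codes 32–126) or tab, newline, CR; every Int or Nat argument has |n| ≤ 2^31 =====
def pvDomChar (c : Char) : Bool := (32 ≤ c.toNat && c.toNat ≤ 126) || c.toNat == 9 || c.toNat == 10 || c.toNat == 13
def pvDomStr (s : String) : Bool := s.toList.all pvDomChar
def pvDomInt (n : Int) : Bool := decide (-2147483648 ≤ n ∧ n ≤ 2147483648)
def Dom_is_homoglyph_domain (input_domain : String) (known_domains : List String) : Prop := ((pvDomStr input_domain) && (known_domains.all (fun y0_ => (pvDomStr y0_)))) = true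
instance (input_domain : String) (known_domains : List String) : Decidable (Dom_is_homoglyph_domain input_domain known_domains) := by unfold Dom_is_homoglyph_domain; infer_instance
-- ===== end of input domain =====

-- B replaces A's per-position candidate rebuild (string slicing + full comparison) by one
-- zip pass per domain collecting the mismatching pairs; objective: alternative algorithm.

-- ===== PORT A =====
-- HOMOGLYPHS.get c / 'c in HOMOGLYPHS and HOMOGLYPHS[c] == …': exact lookup in the 3-entry literal dict
def hgGet (c : Char) : Option Char :=
  if c = 'I' then some 'l' else if c = 'i' then some 'l' else if c = 'l' then some 'I' else none

-- the inner 'for i, (c1, c2) in enumerate(zip(input_domain, legit_domain))' loop;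
-- candidate = input_domain[:i] + HOMOGLYPHS[c1] + input_domain[i+1:] (i ≥ 0, so the slices
-- are take i / drop (i+1) exactly); the guard gives HOMOGLYPHS[c1] = c2.
def aLoop (input legit : List Char) : Nat → List (Char × Char) → Bool
  | _, [] => false
  | i, (c1, c2) :: rest =>
    if c1 ≠ c2 ∧ hgGet c1 = some c2 then
      if input.take i ++ c2 :: input.drop (i + 1) = legit then true
      else aLoop input legit (i + 1) rest
    else aLoop input legit (i + 1) rest

def aOuter (input : String) : List String → Bool × Option String
  | [] => (false, none)
  | legit :: rest =>
    if input.toList.length ≠ legit.toList.length then aOuter input rest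
    else if aLoop input.toList legit.toList 0 (input.toList.zip legit.toList) then (true, some legit)
    else aOuter input rest

def is_homoglyph_domain (input_domain : String) (known_domains : List String) : Bool × Option String :=
  aOuter input_domain known_domains

-- ===== PORT B =====
-- diffs = [(a, b) for a, b in zip(input_domain, legit_domain) if a != b]
def bDiffs (xs ys : List Char) : List (Char × Char) :=
  (xs.zip ys).filter (fun p => p.1 != p.2)

-- len(diffs) == 1 and HOMOGLYPHS.get(diffs[0][0]) == diffs[0][1]
def bCheck (xs ys : List Char) : Bool :=
  match bDiffs xs ys with
  | [(c1, c2)] => hgGet c1 = some c2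
  | _ => false

def bOuter (input : String) : List String → Bool × Option String
  | [] => (false, none)
  | legit :: rest =>
    if legit.toList.length ≠ input.toList.length then bOuter input rest
    else if bCheck input.toList legit.toList then (true, some legit)
    else bOuter input rest

def is_homoglyph_domain_alt (input_domain : String) (known_domains : List String) : Bool × Option String :=
  bOuter input_domain known_domains

-- ===== PRECONDITION & SPEC =====
def Spec_is_homoglyph_domain (input_domain : String) (known_domains : List String) (out : Bool × Option String) : Prop := out = is_homoglyph_domain_alt input_domain known_domains
instance (input_domain : String) (known_domains : List String) (out : Bool × Option String) : Decidable (Spec_is_homoglyph_domain input_domain known_domains out) := by unfold Spec_is_homoglyph_domain; infer_instance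

-- ===== CLAIM (what is proved, stated in full; the proofs are below) =====
def Claim_equal_is_homoglyph_domain : Prop := ∀ (input_domain : String) (known_domains : List String), Dom_is_homoglyph_domain input_domain known_domains → Spec_is_homoglyph_domain input_domain known_domains (is_homoglyph_domain input_domain known_domains)

-- ===== LEMMAS AND PROOFS =====

-- the inner loop, started after a consumed prefix, against the full strings
lemma aLoop_shift (xs : List Char) : ∀ (ys pre preL : List Char),
    pre.length = preL.length → xs.length = ys.length →
    aLoop (pre ++ xs) (preL ++ ys) pre.length (xs.zip ys) =
      if pre = preL then aLoop xs ys 0 (xs.zip ys) else false := by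
  induction xs with
  | nil =>
    intro ys pre preL hp hl
    cases ys with
    | nil => simp [aLoop]
    | cons y ys' => simp at hl
  | cons x xs' ih =>
    intro ys pre preL hp hl
    cases ys with
    | nil => simp at hl
    | cons y ys' =>
      have hl' : xs'.length = ys'.length := by simpa using hl
      have htake : (pre ++ x :: xs').take pre.length = pre := List.take_left
      have hdrop : (pre ++ x :: xs').drop (pre.length + 1) = xs' := by
        have h1 : pre ++ x :: xs' = (pre ++ [x]) ++ xs' := by simp
        rw [h1]; exact List.drop_left' (by simp)
      have hrec : aLoop (pre ++ x :: xs') (preL ++ y :: ys') (pre.length + 1) (xs'.zip ys')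
          = if pre ++ [x] = preL ++ [y] then aLoop xs' ys' 0 (xs'.zip ys') else false := by
        have h1 : pre ++ x :: xs' = (pre ++ [x]) ++ xs' := by simp
        have h2 : preL ++ y :: ys' = (preL ++ [y]) ++ ys' := by simp
        have h3 : pre.length + 1 = (pre ++ [x]).length := by simp
        rw [h1, h2, h3]; exact ih ys' (pre ++ [x]) (preL ++ [y]) (by simp [hp]) hl'
      have h01 : aLoop (x :: xs') (y :: ys') (0 + 1) (xs'.zip ys')
          = if ([x] : List Char) = [y] then aLoop xs' ys' 0 (xs'.zip ys') else false :=
        ih ys' [x] [y] rfl hl'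
      have hL : aLoop (pre ++ x :: xs') (preL ++ y :: ys') pre.length ((x :: xs').zip (y :: ys'))
          = if x ≠ y ∧ hgGet x = some y then
              (if pre ++ y :: xs' = preL ++ y :: ys' then true
               else if pre ++ [x] = preL ++ [y] then aLoop xs' ys' 0 (xs'.zip ys') else false)
            else if pre ++ [x] = preL ++ [y] then aLoop xs' ys' 0 (xs'.zip ys') else false := by
        show (if x ≠ y ∧ hgGet x = some y then
              (if (pre ++ x :: xs').take pre.length ++ y :: (pre ++ x :: xs').drop (pre.length + 1)
                  = preL ++ y :: ys' then true
               else aLoop (pre ++ x :: xs') (preL ++ y :: ys') (pre.length + 1) (xs'.zip ys'))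
            else aLoop (pre ++ x :: xs') (preL ++ y :: ys') (pre.length + 1) (xs'.zip ys')) = _
        rw [htake, hdrop, hrec]
      have hR : aLoop (x :: xs') (y :: ys') 0 ((x :: xs').zip (y :: ys'))
          = if x ≠ y ∧ hgGet x = some y then
              (if y :: xs' = y :: ys' then true
               else if ([x] : List Char) = [y] then aLoop xs' ys' 0 (xs'.zip ys') else false)
            else if ([x] : List Char) = [y] then aLoop xs' ys' 0 (xs'.zip ys') else false := by
        show (if x ≠ y ∧ hgGet x = some y then
              (if (x :: xs').take 0 ++ y :: (x :: xs').drop (0 + 1) = y :: ys' then true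
               else aLoop (x :: xs') (y :: ys') (0 + 1) (xs'.zip ys'))
            else aLoop (x :: xs') (y :: ys') (0 + 1) (xs'.zip ys')) = _
        rw [h01]
        rfl
      show aLoop (pre ++ x :: xs') (preL ++ y :: ys') pre.length ((x :: xs').zip (y :: ys')) = _
      rw [hL, hR]
      by_cases hpl : pre = preL
      · subst hpl
        rw [if_pos rfl]
        by_cases hxy : x = y
        · subst hxy
          have hC : ¬ (x ≠ x ∧ hgGet x = some x) := by simp
          rw [if_neg hC, if_neg hC, if_pos rfl, if_pos rfl]
        · have hS : (if pre ++ [x] = pre ++ [y] then aLoop xs' ys' 0 (xs'.zip ys') else false)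
              = false := by rw [if_neg (by simp [hxy])]
          have hS0 : (if ([x] : List Char) = [y] then aLoop xs' ys' 0 (xs'.zip ys') else false)
              = false := by rw [if_neg (by simp [hxy])]
          rw [hS, hS0]
          by_cases hC : x ≠ y ∧ hgGet x = some y
          · rw [if_pos hC, if_pos hC]
            by_cases hts : xs' = ys'
            · subst hts; rw [if_pos rfl, if_pos rfl]
            · rw [if_neg (by simpa using hts), if_neg (by simpa using hts)]
          · rw [if_neg hC, if_neg hC]
      · rw [if_neg hpl]
        have hS : (if pre ++ [x] = preL ++ [y] then aLoop xs' ys' 0 (xs'.zip ys') else false)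
            = false := by
          rw [if_neg (fun h => hpl (List.append_inj h hp).1)]
        have hcand : ¬ (pre ++ y :: xs' = preL ++ y :: ys') :=
          fun h => hpl (List.append_inj h hp).1
        rw [hS]
        by_cases hC : x ≠ y ∧ hgGet x = some y
        · rw [if_pos hC, if_neg hcand]
        · rw [if_neg hC]

lemma bDiffs_cons_ne (x y : Char) (xs ys : List Char) (hxy : x ≠ y) :
    bDiffs (x :: xs) (y :: ys) = (x, y) :: bDiffs xs ys := by
  simp [bDiffs, hxy]

lemma bDiffs_cons_eq (x : Char) (xs ys : List Char) :
    bDiffs (x :: xs) (x :: ys) = bDiffs xs ys := by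
  simp [bDiffs]

lemma bDiffs_nil_iff (xs : List Char) : ∀ ys : List Char, xs.length = ys.length →
    (bDiffs xs ys = [] ↔ xs = ys) := by
  induction xs with
  | nil =>
    intro ys hl
    cases ys with
    | nil => simp [bDiffs]
    | cons y ys' => simp at hl
  | cons x xs' ih =>
    intro ys hl
    cases ys with
    | nil => simp at hl
    | cons y ys' =>
      have hl' : xs'.length = ys'.length := by simpa using hl
      by_cases hxy : x = y
      · subst hxy
        rw [bDiffs_cons_eq, ih ys' hl']
        simp
      · rw [bDiffs_cons_ne x y xs' ys' hxy]
        simp [hxy]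

lemma inner_eq (xs : List Char) : ∀ ys : List Char, xs.length = ys.length →
    aLoop xs ys 0 (xs.zip ys) = bCheck xs ys := by
  induction xs with
  | nil =>
    intro ys hl
    cases ys with
    | nil => rfl
    | cons y ys' => simp at hl
  | cons x xs' ih =>
    intro ys hl
    cases ys with
    | nil => simp at hl
    | cons y ys' =>
      have hl' : xs'.length = ys'.length := by simpa using hl
      have h01 : aLoop (x :: xs') (y :: ys') (0 + 1) (xs'.zip ys')
          = if ([x] : List Char) = [y] then aLoop xs' ys' 0 (xs'.zip ys') else false :=
        aLoop_shift xs' ys' [x] [y] rfl hl'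
      have hstep : aLoop (x :: xs') (y :: ys') 0 ((x :: xs').zip (y :: ys'))
          = if x ≠ y ∧ hgGet x = some y then
              (if y :: xs' = y :: ys' then true
               else if ([x] : List Char) = [y] then aLoop xs' ys' 0 (xs'.zip ys') else false)
            else if ([x] : List Char) = [y] then aLoop xs' ys' 0 (xs'.zip ys') else false := by
        show (if x ≠ y ∧ hgGet x = some y then
              (if (x :: xs').take 0 ++ y :: (x :: xs').drop (0 + 1) = y :: ys' then true
               else aLoop (x :: xs') (y :: ys') (0 + 1) (xs'.zip ys'))
            else aLoop (x :: xs') (y :: ys') (0 + 1) (xs'.zip ys')) = _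
        rw [h01]
        rfl
      rw [hstep]
      by_cases hxy : x = y
      · subst hxy
        have hC : ¬ (x ≠ x ∧ hgGet x = some x) := by simp
        rw [if_neg hC, if_pos rfl, ih ys' hl']
        show bCheck xs' ys' = bCheck (x :: xs') (x :: ys')
        unfold bCheck
        rw [bDiffs_cons_eq]
      · rw [bCheck, bDiffs_cons_ne x y xs' ys' hxy]
        by_cases hg : hgGet x = some y
        · rw [if_pos ⟨hxy, hg⟩]
          by_cases hts : xs' = ys'
          · rw [if_pos (by rw [hts]),
                (bDiffs_nil_iff xs' ys' hl').mpr hts]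
            simp [hg]
          · rw [if_neg (by simpa using hts),
              if_neg (by simp [hxy] : ¬ (([x] : List Char) = [y]))]
            cases hd : bDiffs xs' ys' with
            | nil => exact absurd ((bDiffs_nil_iff xs' ys' hl').mp hd) hts
            | cons d ds => simp
        · rw [if_neg (by simp [hg] : ¬ (x ≠ y ∧ hgGet x = some y)),
              if_neg (by simp [hxy] : ¬ (([x] : List Char) = [y]))]
          cases hd : bDiffs xs' ys' with
          | nil => simp [hg]
          | cons d ds => simp

lemma outer_eq (input : String) : ∀ kds : List String, aOuter input kds = bOuter input kds := by
  intro kds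
  induction kds with
  | nil => rfl
  | cons legit rest ih =>
    simp only [aOuter, bOuter]
    by_cases hlen : input.toList.length = legit.toList.length
    · rw [if_neg (show ¬ (input.toList.length ≠ legit.toList.length) by omega),
          if_neg (show ¬ (legit.toList.length ≠ input.toList.length) by omega),
          inner_eq _ _ hlen, ih]
    · rw [if_pos (show input.toList.length ≠ legit.toList.length from hlen),
          if_pos (show legit.toList.length ≠ input.toList.length from fun h => hlen h.symm), ih]

-- ===== VERDICT (by name: the statement is the Claim_ definition above) =====
theorem is_homoglyph_domain_spec : Claim_equal_is_homoglyph_domain := by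
  intro input kds _
  show is_homoglyph_domain input kds = is_homoglyph_domain_alt input kds
  exact outer_eq input kds
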